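-- pv_equiv track=rewrite | github.com/premkumar6767/Codebypremkumar- | prem3.py | bfs
-- ===== SOURCE A (Python) =====
-- from collections import deque
--
-- def bfs(n, m, num):
--     result = []
--     q = deque([num])
--
--     while q:
--         step_num = q.popleft()
--
--         if n <= step_num <= m:
--             result.append(step_num)
--
--         if step_num == 0 or step_num > m:
--             continue
--
--         last_digit = step_num % 10
--
--
--         step_num_a = step_num * 10 + (last_digit - 1)
--         step_num_b = step_num * 10 + (last_digit + 1)
--
--         if last_digit > 0:
--             q.append(step_num_a)
--
--         if last_digit < 9:
--             q.append(step_num_b)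
--
--     return result
-- ===== SOURCE B (Python) =====
-- def bfs(n, m, num):
--     # Recursive DFS over the implicit stepping-number tree, then one sort.
--     # (BFS order from a single seed is ascending, so sorting the DFS-visited
--     # values reproduces A's output exactly.)
--     out = []
--
--     def visit(v):
--         if n <= v <= m:
--             out.append(v)
--         if v == 0 or v > m:
--             return
--         d = v % 10
--         if d > 0:
--             visit(v * 10 + d - 1)
--         if d < 9:
--             visit(v * 10 + d + 1)
--
--     visit(num)
--     return sorted(out)
-- ===== Notes on version B (the rewrite author's own statement) =====
-- stated objective: alternative
-- what changed: Replaces the FIFO-queue breadth-first loop with a recursive depth-first traversal of the implicit stepping-number tree followed by a single sort; the sort recovers A's output because BFS order from one seed is provably strictly ascending.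
import Mathlib
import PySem

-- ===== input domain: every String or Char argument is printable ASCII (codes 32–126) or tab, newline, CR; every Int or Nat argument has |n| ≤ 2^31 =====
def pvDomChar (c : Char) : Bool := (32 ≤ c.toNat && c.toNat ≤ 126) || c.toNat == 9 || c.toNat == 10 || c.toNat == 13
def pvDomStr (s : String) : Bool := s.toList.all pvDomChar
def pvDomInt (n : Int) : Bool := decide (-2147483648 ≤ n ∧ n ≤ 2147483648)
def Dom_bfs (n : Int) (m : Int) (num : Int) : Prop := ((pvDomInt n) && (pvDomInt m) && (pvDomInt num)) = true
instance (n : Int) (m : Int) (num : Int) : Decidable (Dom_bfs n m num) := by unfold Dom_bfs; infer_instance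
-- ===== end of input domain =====

-- B replaces A's FIFO-queue BFS by a recursive DFS over the stepping-number tree plus one
-- final sort (equal on Pre_ because A's BFS emission order is strictly ascending).

-- ===== PORT A =====
-- the while-loop over the deque, one dequeue per fuel step; inside Dom (|m| ≤ 2^31 < 10^11)
-- every terminating run dequeues fewer than 4096 nodes, so the fuel guard never fires there.
def bfsLoop (n : Int) (m : Int) : Nat → List Int → List Int → List Int
  | 0, _, acc => acc
  | _ + 1, [], acc => acc
  | f + 1, x :: r, acc =>
    let acc' := if n ≤ x ∧ x ≤ m then acc ++ [x] else acc
    if x = 0 ∨ m < x then bfsLoop n m f r acc'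
    else
      let d := PySem.Int.mod x 10
      let a := x * 10 + (d - 1)
      let b := x * 10 + (d + 1)
      let q1 := if 0 < d then r ++ [a] else r
      let q2 := if d < 9 then q1 ++ [b] else q1
      bfsLoop n m f q2 acc'

def bfs (n : Int) (m : Int) (num : Int) : List Int := bfsLoop n m 4096 [num] []

-- ===== PORT B =====
-- visit(v) of Source B: the list of values appended to `out`, in call order; fuel 13 bounds the
-- recursion depth, which inside Dom never exceeds 12.
def dfsVisit (n : Int) (m : Int) : Nat → Int → List Int
  | 0, _ => []
  | f + 1, v =>
    (if n ≤ v ∧ v ≤ m then [v] else []) ++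
    (if v = 0 ∨ m < v then []
     else
       let d := PySem.Int.mod v 10
       (if 0 < d then dfsVisit n m f (v * 10 + (d - 1)) else []) ++
       (if d < 9 then dfsVisit n m f (v * 10 + (d + 1)) else []))

def bfs_alt (n : Int) (m : Int) (num : Int) : List Int :=
  PySem.List.sorted (dfsVisit n m 13 num) (fun v => v)

-- ===== PRECONDITION & SPEC =====
-- Pre_ excludes exactly the seeds num < 0 with num ≤ m: there A's queue grows forever
-- (children of a negative node are smaller negatives, never 0 and never > m), so A never
-- returns on those inputs; on every other input A terminates normally.
def Pre_bfs (n : Int) (m : Int) (num : Int) : Prop := 0 ≤ num ∨ m < num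
instance (n : Int) (m : Int) (num : Int) : Decidable (Pre_bfs n m num) := by unfold Pre_bfs; infer_instance
def pvWitness_bfs : Int × Int × Int := (0, 20, 1)
def Spec_bfs (n : Int) (m : Int) (num : Int) (out : List Int) : Prop := out = bfs_alt n m num
instance (n : Int) (m : Int) (num : Int) (out : List Int) : Decidable (Spec_bfs n m num out) := by unfold Spec_bfs; infer_instance

-- ===== CLAIM (what is proved, stated in full; the proofs are below) =====
def Claim_equal_bfs : Prop := ∀ (n : Int) (m : Int) (num : Int), Dom_bfs n m num → Pre_bfs n m num → Spec_bfs n m num (bfs n m num)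

-- ===== LEMMAS AND PROOFS =====

-- The tree of nodes the loop dequeues from a positive seed (proof-side description).
def subtree (m : Int) (x : Int) : List Int :=
  if h : 1 ≤ x ∧ x ≤ m then
    x :: ((if 0 < PySem.Int.mod x 10 then subtree m (x * 10 + (PySem.Int.mod x 10 - 1)) else []) ++
          (if PySem.Int.mod x 10 < 9 then subtree m (x * 10 + (PySem.Int.mod x 10 + 1)) else []))
  else [x]
termination_by (m + 1 - x).toNat
decreasing_by
  all_goals
    have h1 := PySem.Int.mod_nonneg x (b := 10) (by norm_num)
    have h2 := PySem.Int.mod_lt x (b := 10) (by norm_num)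
    omega

lemma subtree_length_le (m : Int) : ∀ (k : Nat) (x : Int), 1 ≤ x → m < x * 10 ^ k →
    (subtree m x).length ≤ 2 ^ (k + 1) - 1 := by
  intro k
  induction k with
  | zero =>
    intro x hx hm
    rw [subtree]
    have h : ¬ (1 ≤ x ∧ x ≤ m) := by simp only [pow_zero, mul_one] at hm; omega
    simp [h]
  | succ k ih =>
    intro x hx hm
    rw [subtree]
    split
    case isFalse =>
      simp only [List.length_cons, List.length_nil]
      have h3 : (1:Nat) ≤ 2 ^ (k + 1 + 1) := Nat.one_le_two_pow
      omega
    case isTrue h =>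
      have hd0 := PySem.Int.mod_nonneg x (b := 10) (by norm_num)
      have hd9 := PySem.Int.mod_lt x (b := 10) (by norm_num)
      have hxm : m < (x * 10) * 10 ^ k := by
        rw [show x * 10 ^ (k + 1) = (x * 10) * 10 ^ k from by ring] at hm
        exact hm
      have hA : (if 0 < PySem.Int.mod x 10 then
          subtree m (x * 10 + (PySem.Int.mod x 10 - 1)) else []).length ≤ 2 ^ (k + 1) - 1 := by
        split
        case isTrue hd =>
          apply ih _ (by omega)
          have := mul_le_mul_of_nonneg_right
            (show x * 10 ≤ x * 10 + (PySem.Int.mod x 10 - 1) by omega)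
            (show (0:Int) ≤ 10 ^ k by positivity)
          omega
        case isFalse => simp
      have hB : (if PySem.Int.mod x 10 < 9 then
          subtree m (x * 10 + (PySem.Int.mod x 10 + 1)) else []).length ≤ 2 ^ (k + 1) - 1 := by
        split
        case isTrue hd =>
          apply ih _ (by omega)
          have := mul_le_mul_of_nonneg_right
            (show x * 10 ≤ x * 10 + (PySem.Int.mod x 10 + 1) by omega)
            (show (0:Int) ≤ 10 ^ k by positivity)
          omega
        case isFalse => simp
      have h2 : (2:Nat) ^ (k + 1 + 1) = 2 ^ (k + 1) + 2 ^ (k + 1) := by ring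
      have h3 : (1:Nat) ≤ 2 ^ (k + 1) := Nat.one_le_two_pow
      simp only [List.length_cons, List.length_append]
      omega

-- B's DFS visit list is the range-filter of the subtree node list (given enough fuel).
lemma dfsVisit_eq (n m : Int) : ∀ (k f : Nat) (x : Int), 1 ≤ x → m < x * 10 ^ k → k < f →
    dfsVisit n m f x = (subtree m x).filter (fun v => decide (n ≤ v ∧ v ≤ m)) := by
  intro k
  induction k with
  | zero =>
    intro f x hx hm hf
    obtain ⟨f, rfl⟩ : ∃ f', f = f' + 1 := ⟨f - 1, by omega⟩
    simp only [pow_zero, mul_one] at hm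
    rw [dfsVisit, subtree]
    have h1 : ¬ (1 ≤ x ∧ x ≤ m) := by omega
    have h2 : ¬ (n ≤ x ∧ x ≤ m) := by omega
    simp [h1, h2, Or.inr hm]
  | succ k ih =>
    intro f x hx hm hf
    obtain ⟨f, rfl⟩ : ∃ f', f = f' + 1 := ⟨f - 1, by omega⟩
    by_cases hgt : m < x
    · rw [dfsVisit, subtree]
      have h1 : ¬ (1 ≤ x ∧ x ≤ m) := by omega
      have h2 : ¬ (n ≤ x ∧ x ≤ m) := by omega
      simp [h1, h2, Or.inr hgt]
    · have hd0 := PySem.Int.mod_nonneg x (b := 10) (by norm_num)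
      have hd9 := PySem.Int.mod_lt x (b := 10) (by norm_num)
      have hxm : m < (x * 10) * 10 ^ k := by
        rw [show x * 10 ^ (k + 1) = (x * 10) * 10 ^ k from by ring] at hm
        exact hm
      rw [dfsVisit, subtree]
      have h1 : 1 ≤ x ∧ x ≤ m := ⟨hx, by omega⟩
      have h3 : ¬ (x = 0 ∨ m < x) := by omega
      have hA : (if 0 < PySem.Int.mod x 10 then dfsVisit n m f (x * 10 + (PySem.Int.mod x 10 - 1)) else [])
          = (if 0 < PySem.Int.mod x 10 then subtree m (x * 10 + (PySem.Int.mod x 10 - 1)) else []).filter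
              (fun v => decide (n ≤ v ∧ v ≤ m)) := by
        split
        case isTrue hd =>
          apply ih f _ (by omega) _ (by omega)
          have := mul_le_mul_of_nonneg_right
            (show x * 10 ≤ x * 10 + (PySem.Int.mod x 10 - 1) by omega)
            (show (0:Int) ≤ 10 ^ k by positivity)
          omega
        case isFalse => simp
      have hB : (if PySem.Int.mod x 10 < 9 then dfsVisit n m f (x * 10 + (PySem.Int.mod x 10 + 1)) else [])
          = (if PySem.Int.mod x 10 < 9 then subtree m (x * 10 + (PySem.Int.mod x 10 + 1)) else []).filter
              (fun v => decide (n ≤ v ∧ v ≤ m)) := by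
        split
        case isTrue hd =>
          apply ih f _ (by omega) _ (by omega)
          have := mul_le_mul_of_nonneg_right
            (show x * 10 ≤ x * 10 + (PySem.Int.mod x 10 + 1) by omega)
            (show (0:Int) ≤ 10 ^ k by positivity)
          omega
        case isFalse => simp
      simp only [dif_pos h1, if_neg h3, List.filter_cons, List.filter_append, hA, hB]
      by_cases hr : n ≤ x ∧ x ≤ m <;> simp [hr]

-- A's loop emits (as a multiset) the range-filter of the subtrees of the queue.
lemma bfsLoop_perm (n m : Int) : ∀ (f : Nat) (q acc : List Int), (∀ y ∈ q, 1 ≤ y) →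
    (q.flatMap (subtree m)).length ≤ f →
    (bfsLoop n m f q acc).Perm
      (acc ++ (q.flatMap (subtree m)).filter (fun v => decide (n ≤ v ∧ v ≤ m))) := by
  intro f
  induction f with
  | zero =>
    intro q acc _ hlen
    have hq : q.flatMap (subtree m) = [] := List.length_eq_zero_iff.mp (by omega)
    rw [bfsLoop, hq]
    simp
  | succ f ih =>
    intro q acc hpos hlen
    cases q with
    | nil => rw [bfsLoop]; simp
    | cons x r =>
      have hx : 1 ≤ x := hpos x (by simp)
      have hd0 := PySem.Int.mod_nonneg x (b := 10) (by norm_num)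
      have hd9 := PySem.Int.mod_lt x (b := 10) (by norm_num)
      simp only [bfsLoop]
      by_cases hgt : m < x
      · have hb : x = 0 ∨ m < x := Or.inr hgt
        have hsub : subtree m x = [x] := by rw [subtree]; rw [dif_neg (by omega)]
        have hlen' : (r.flatMap (subtree m)).length ≤ f := by
          simp only [List.flatMap_cons, hsub, List.length_append, List.length_cons,
            List.length_nil] at hlen ⊢
          omega
        have hrange : ¬ (n ≤ x ∧ x ≤ m) := by omega
        simp only [if_pos hb, if_neg hrange]
        refine (ih r acc (fun y hy => hpos y (by simp [hy])) hlen').trans ?_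
        simp [hsub, List.flatMap_cons, hrange]
      · have hb : ¬ (x = 0 ∨ m < x) := by omega
        simp only [if_neg hb]
        set d := PySem.Int.mod x 10 with hdd
        set xa := x * 10 + (d - 1) with hxa
        set xb := x * 10 + (d + 1) with hxb
        have hsub : subtree m x = x ::
            ((if 0 < d then subtree m xa else []) ++ (if d < 9 then subtree m xb else [])) := by
          rw [subtree]; rw [dif_pos ⟨hx, by omega⟩]
        set A := (if 0 < d then subtree m xa else []) with hA
        set B := (if d < 9 then subtree m xb else []) with hB
        set P := ((if 0 < d then [xa] else []) ++ (if d < 9 then [xb] else [])) with hP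
        have hq2 : (if d < 9 then (if 0 < d then r ++ [xa] else r) ++ [xb]
                    else (if 0 < d then r ++ [xa] else r)) = r ++ P := by
          by_cases h0 : 0 < d <;> by_cases h9 : d < 9 <;> simp [hP, h0, h9]
        rw [hq2]
        have hflatP : P.flatMap (subtree m) = A ++ B := by
          by_cases h0 : 0 < d <;> by_cases h9 : d < 9 <;> simp [hP, hA, hB, h0, h9]
        have hflat : (r ++ P).flatMap (subtree m) = r.flatMap (subtree m) ++ (A ++ B) := by
          rw [List.flatMap_append, hflatP]
        have hpos2 : ∀ y ∈ r ++ P, 1 ≤ y := by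
          intro y hy
          rcases List.mem_append.mp hy with h | h
          · exact hpos y (by simp [h])
          · rcases List.mem_append.mp h with h' | h' <;> split at h' <;>
              simp at h' <;> omega
        have hlen2 : ((r ++ P).flatMap (subtree m)).length ≤ f := by
          rw [hflat]
          simp only [List.flatMap_cons, hsub, List.length_append, List.length_cons] at hlen ⊢
          omega
        refine (ih (r ++ P) _ hpos2 hlen2).trans ?_
        have h1 : ((r ++ P).flatMap (subtree m)).filter (fun v => decide (n ≤ v ∧ v ≤ m)) =
            (r.flatMap (subtree m)).filter (fun v => decide (n ≤ v ∧ v ≤ m)) ++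
            (A.filter (fun v => decide (n ≤ v ∧ v ≤ m)) ++ B.filter (fun v => decide (n ≤ v ∧ v ≤ m))) := by
          rw [hflat]; simp [List.filter_append]
        have h2 : ((x :: r).flatMap (subtree m)).filter (fun v => decide (n ≤ v ∧ v ≤ m)) =
            (if n ≤ x ∧ x ≤ m then [x] else []) ++
            ((A.filter (fun v => decide (n ≤ v ∧ v ≤ m)) ++ B.filter (fun v => decide (n ≤ v ∧ v ≤ m))) ++
             (r.flatMap (subtree m)).filter (fun v => decide (n ≤ v ∧ v ≤ m))) := by
          simp only [List.flatMap_cons, hsub, List.filter_append, List.filter_cons]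
          by_cases hr : n ≤ x ∧ x ≤ m <;> simp [hr, List.append_assoc]
        have h3 : (if n ≤ x ∧ x ≤ m then acc ++ [x] else acc) = acc ++ (if n ≤ x ∧ x ≤ m then [x] else []) := by
          split <;> simp
        rw [h3, h2, h1, List.append_assoc]
        exact List.Perm.append_left _ (List.Perm.append_left _ List.perm_append_comm)

-- A's loop emits in strictly increasing order (queue invariant).
lemma bfsLoop_sorted (n m : Int) : ∀ (f : Nat) (q acc : List Int),
    q.Pairwise (fun u v => u + 2 ≤ v) →
    (∀ y ∈ q, 1 ≤ y) →
    (∀ y ∈ q, ∀ z ∈ q, y ≤ z → z ≤ 10 * y - 2) →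
    (∀ a ∈ acc, ∀ y ∈ q, a < y) →
    acc.Pairwise (· < ·) →
    (bfsLoop n m f q acc).Pairwise (· < ·) := by
  intro f
  induction f with
  | zero => intro q acc _ _ _ _ hacc; rw [bfsLoop]; exact hacc
  | succ f ih =>
    intro q acc hpw hpos hbnd hlt hacc
    cases q with
    | nil => rw [bfsLoop]; exact hacc
    | cons x r =>
      have hx : 1 ≤ x := hpos x (by simp)
      have hd0 := PySem.Int.mod_nonneg x (b := 10) (by norm_num)
      have hd9 := PySem.Int.mod_lt x (b := 10) (by norm_num)
      have hxr : ∀ y ∈ r, x + 2 ≤ y := (List.pairwise_cons.mp hpw).1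
      have hpwr : r.Pairwise (fun u v => u + 2 ≤ v) := (List.pairwise_cons.mp hpw).2
      have hrb : ∀ y ∈ r, y ≤ 10 * x - 2 := fun y hy =>
        hbnd x (by simp) y (by simp [hy]) (by have := hxr y hy; omega)
      simp only [bfsLoop]
      have hacc' : (if n ≤ x ∧ x ≤ m then acc ++ [x] else acc).Pairwise (· < ·) := by
        split
        · refine List.pairwise_append.mpr ⟨hacc, by simp, ?_⟩
          intro a1 ha1 b1 hb1
          simp only [List.mem_singleton] at hb1
          subst hb1
          exact hlt a1 ha1 _ (by simp)
        · exact hacc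
      have hacc'mem : ∀ a ∈ (if n ≤ x ∧ x ≤ m then acc ++ [x] else acc), a ∈ acc ∨ a = x := by
        intro a ha; split at ha
        · rcases List.mem_append.mp ha with h | h
          · exact Or.inl h
          · simp at h; exact Or.inr h
        · exact Or.inl ha
      by_cases hgt : m < x
      · have hb : x = 0 ∨ m < x := Or.inr hgt
        simp only [if_pos hb]
        refine ih r _ hpwr (fun y hy => hpos y (by simp [hy]))
          (fun y hy z hz hyz => hbnd y (by simp [hy]) z (by simp [hz]) hyz) ?_ hacc'
        intro a ha y hy
        rcases hacc'mem a ha with h | h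
        · exact hlt a h y (by simp [hy])
        · subst h; have := hxr y hy; omega
      · have hb : ¬ (x = 0 ∨ m < x) := by omega
        simp only [if_neg hb]
        set d := PySem.Int.mod x 10 with hdd
        set xa := x * 10 + (d - 1) with hxa
        set xb := x * 10 + (d + 1) with hxb
        set P := ((if 0 < d then [xa] else []) ++ (if d < 9 then [xb] else [])) with hP
        have hq2 : (if d < 9 then (if 0 < d then r ++ [xa] else r) ++ [xb]
                    else (if 0 < d then r ++ [xa] else r)) = r ++ P := by
          by_cases h0 : 0 < d <;> by_cases h9 : d < 9 <;> simp [hP, h0, h9]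
        rw [hq2]
        have hPmem : ∀ y ∈ P, (y = xa ∧ 0 < d) ∨ (y = xb ∧ d < 9) := by
          intro y hy
          rcases List.mem_append.mp hy with h | h <;> split at h <;> simp at h <;>
            first | exact Or.inl ⟨h, by assumption⟩ | exact Or.inr ⟨h, by assumption⟩
        have hPge : ∀ y ∈ P, 10 * x ≤ y := by
          intro y hy; rcases hPmem y hy with ⟨h, h'⟩ | ⟨h, h'⟩ <;> subst h <;> omega
        have hPle : ∀ y ∈ P, y ≤ 10 * x + 9 := by
          intro y hy; rcases hPmem y hy with ⟨h, h'⟩ | ⟨h, h'⟩ <;> subst h <;> omega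
        have hPpw : P.Pairwise (fun u v => u + 2 ≤ v) := by
          rw [hP]
          by_cases h0 : 0 < d <;> by_cases h9 : d < 9 <;> simp [h0, h9] <;> omega
        have hmem2 : ∀ y ∈ r ++ P, y ∈ r ∨ y ∈ P := fun y hy => List.mem_append.mp hy
        refine ih (r ++ P) _ ?_ ?_ ?_ ?_ hacc'
        · refine List.pairwise_append.mpr ⟨hpwr, hPpw, ?_⟩
          intro a ha b hb
          have h1 := hrb a ha
          have h2 := hPge b hb
          omega
        · intro y hy
          rcases hmem2 y hy with h | h
          · exact hpos y (by simp [h])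
          · have := hPge y h; omega
        · intro y hy z hz hyz
          rcases hmem2 y hy with hy' | hy' <;> rcases hmem2 z hz with hz' | hz'
          · exact hbnd y (by simp [hy']) z (by simp [hz']) hyz
          · have h1 := hxr y hy'
            have h2 := hPle z hz'
            omega
          · have h1 := hrb z hz'
            have h2 := hPge y hy'
            omega
          · have h1 := hPge y hy'
            have h2 := hPle z hz'
            have h3 : 10 ≤ x * 10 := by omega
            omega
        · intro a ha y hy
          rcases hacc'mem a ha with h | h
          · rcases hmem2 y hy with h' | h'
            · exact hlt a h y (by simp [h'])
            · have h1 := hlt a h x (by simp)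
              have h2 := hPge y h'
              omega
          · subst h
            rcases hmem2 y hy with h' | h'
            · have := hxr y h'; omega
            · have := hPge y h'; omega

-- one dequeue of a non-expanding node ends the loop.
lemma bfsLoop_single (n m : Int) (f : Nat) (x : Int) (acc : List Int) (hb : x = 0 ∨ m < x) :
    bfsLoop n m (f + 1 + 1) [x] acc = if n ≤ x ∧ x ≤ m then acc ++ [x] else acc := by
  simp only [bfsLoop, if_pos hb]

-- one visit of a non-expanding node ends the DFS.
lemma dfsVisit_single (n m : Int) (f : Nat) (x : Int) (hb : x = 0 ∨ m < x) :
    dfsVisit n m (f + 1) x = if n ≤ x ∧ x ≤ m then [x] else [] := by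
  simp only [dfsVisit, if_pos hb]
  split <;> simp

-- sorted [] and sorted [v] are themselves.
lemma sorted_small (l : List Int) (h : l.Pairwise (fun a b => a ≤ b)) :
    PySem.List.sorted l (fun v => v) = l :=
  PySem.List.sorted_eq_self_of_pairwise l _ h

-- ===== VERDICT (by name: the statement is the Claim_ definition above) =====
theorem bfs_spec : Claim_equal_bfs := by
  intro n m num hDom hPre
  unfold Spec_bfs
  have hm31 : m ≤ 2147483648 := by
    unfold Dom_bfs pvDomInt at hDom
    simp only [Bool.and_eq_true, decide_eq_true_eq] at hDom
    exact hDom.1.2.2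
  rcases lt_trichotomy num 0 with hneg | hzero | hposn
  · -- num < 0: Pre_ forces m < num; one dequeue, nothing emitted, nothing pushed
    have hgt : m < num := by rcases hPre with h | h <;> omega
    have hb : num = 0 ∨ m < num := Or.inr hgt
    have hAv : bfs n m num = if n ≤ num ∧ num ≤ m then [num] else [] := by
      rw [bfs, show (4096:Nat) = 4094 + 1 + 1 by norm_num, bfsLoop_single n m 4094 num [] hb]
      split <;> simp
    have hBv : bfs_alt n m num = if n ≤ num ∧ num ≤ m then [num] else [] := by
      rw [bfs_alt, show (13:Nat) = 12 + 1 by norm_num, dfsVisit_single n m 12 num hb]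
      split <;> exact sorted_small _ (by simp)
    rw [hAv, hBv]
  · -- num = 0: one dequeue, possibly emitted, nothing pushed
    subst hzero
    have hb : (0:Int) = 0 ∨ m < 0 := Or.inl rfl
    have hAv : bfs n m 0 = if n ≤ (0:Int) ∧ (0:Int) ≤ m then [0] else [] := by
      rw [bfs, show (4096:Nat) = 4094 + 1 + 1 by norm_num, bfsLoop_single n m 4094 0 [] hb]
      split <;> simp
    have hBv : bfs_alt n m 0 = if n ≤ (0:Int) ∧ (0:Int) ≤ m then [0] else [] := by
      rw [bfs_alt, show (13:Nat) = 12 + 1 by norm_num, dfsVisit_single n m 12 0 hb]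
      split <;> exact sorted_small _ (by simp)
    rw [hAv, hBv]
  · -- 1 ≤ num: the BFS/DFS machinery
    have hx : 1 ≤ num := hposn
    have hk : m < num * 10 ^ 11 := by
      have h1 : (10:Int) ^ 11 = 100000000000 := by norm_num
      have h2 : num * 10 ^ 11 ≥ 1 * 10 ^ 11 :=
        mul_le_mul_of_nonneg_right hx (by positivity)
      omega
    have hsz : (subtree m num).length ≤ 2 ^ 12 - 1 := subtree_length_le m 11 num hx hk
    have hperm := bfsLoop_perm n m 4096 [num] [] (by simpa using hx)
      (by simp only [List.flatMap_cons, List.flatMap_nil, List.append_nil]; omega)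
    simp only [List.flatMap_cons, List.flatMap_nil, List.append_nil, List.nil_append] at hperm
    have hsort := bfsLoop_sorted n m 4096 [num] []
      (by simp) (by simpa using hx)
      (by intro y hy z hz hyz; simp at hy hz; subst hy; subst hz; omega)
      (by simp) (by simp)
    have hdfs := dfsVisit_eq n m 11 13 num hx hk (by norm_num)
    rw [bfs_alt, hdfs]
    exact (PySem.List.sorted_eq_of_perm_of_pairwise_lt _ (bfs n m num) (fun v => v)
      hperm hsort).symm
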